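-- pv_equiv track=rewrite | github.com/monkey0211/AlgoInPython | LinkedIn/LinkedIn_Largest Possible Island.py | findLargestIslandWithCircular
-- ===== SOURCE A (Python) =====
-- def findLargestIslandWithCircular(islands, material):
--     islands = islands + islands
--     maxLength = 0
--     left = 0
--     cnt = 0
--     for right in range(len(islands)):
--         if islands[right] == 0:
--             cnt += 1
--         while cnt > material:
--             if islands[left] == 0:
--                 cnt -= 1
--             left += 1
--         maxLength = max(maxLength, min(right - left + 1, len(islands) // 2))
--     return maxLength
-- ===== SOURCE B (Python) =====
-- def findLargestIslandWithCircular(islands, material):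
--     n = len(islands)
--     doubled = islands + islands
--     zeros = [i for i, v in enumerate(doubled) if v == 0]
--     if len(zeros) <= material:
--         return min(len(doubled), n)
--     best = 0
--     for j in range(len(zeros) - material + 1):
--         left = zeros[j - 1] if j > 0 else -1
--         right = zeros[j + material] if j + material < len(zeros) else len(doubled)
--         best = max(best, right - left - 1)
--     return min(best, n)
-- ===== Notes on version B (the rewrite author's own statement) =====
-- stated objective: faster
-- what changed: Instead of a two-pointer sliding window over every cell of the doubled array, B collects the zero positions once and slides a window of material+1 consecutive zeros over that list, reading each candidate run length directly off the neighbouring zero positions (virtual boundaries -1 and len(doubled)).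
-- outside the precondition, e.g. on findLargestIslandWithCircular([], -1): A returns 0, B raises IndexError
import Mathlib
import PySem

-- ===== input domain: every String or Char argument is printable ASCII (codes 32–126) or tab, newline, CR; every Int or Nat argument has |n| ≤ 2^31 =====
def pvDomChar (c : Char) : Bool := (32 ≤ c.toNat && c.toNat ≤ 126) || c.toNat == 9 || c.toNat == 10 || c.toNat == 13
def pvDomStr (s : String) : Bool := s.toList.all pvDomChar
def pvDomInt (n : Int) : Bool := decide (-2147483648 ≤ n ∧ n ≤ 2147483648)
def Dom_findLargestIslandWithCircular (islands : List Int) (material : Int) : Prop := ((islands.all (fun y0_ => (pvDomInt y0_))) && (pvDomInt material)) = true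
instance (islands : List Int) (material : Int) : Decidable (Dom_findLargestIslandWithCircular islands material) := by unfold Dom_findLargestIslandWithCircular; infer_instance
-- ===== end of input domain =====

-- B replaces A's cell-by-cell two-pointer sliding window by one pass over the list of zero
-- positions, sliding a window of material+1 consecutive zeros (a constant-factor speedup
-- measured).


-- ===== PORT A =====
-- the inner 'while cnt > material' loop; fuel bounds the number of iterations (inside
-- Pre_ the loop stops before left leaves the array, and fuel = len+1 always suffices)
def pvAdvance (xs : List Int) (material : Int) : Nat → Int → Int → Int × Int
  | 0, left, cnt => (left, cnt)
  | fuel+1, left, cnt =>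
    if cnt > material then
      let v := (PySem.List.pyGet? xs left).getD 1
      pvAdvance xs material fuel (left + 1) (if v = 0 then cnt - 1 else cnt)
    else (left, cnt)

-- one iteration of A's 'for right in range(len(islands))' body; state = (maxLength, left, cnt)
def pvStepA (islands2 : List Int) (material : Int) (s : Int × Int × Int) (right : Int) : Int × Int × Int :=
  let cnt := if (PySem.List.pyGet? islands2 right).getD 1 = 0 then s.2.2 + 1 else s.2.2
  let lc := pvAdvance islands2 material (islands2.length + 1) s.2.1 cnt
  (max s.1 (min (right - lc.1 + 1) (PySem.Int.floordiv (islands2.length : Int) 2)), lc.1, lc.2)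

def findLargestIslandWithCircular (islands : List Int) (material : Int) : Int :=
  let islands2 := islands ++ islands
  ((PySem.List.pyRange 0 (islands2.length : Int) 1).foldl (pvStepA islands2 material) (0, 0, 0)).1

-- ===== PORT B =====
-- one iteration of B's loop over j in range(len(zeros) - material + 1)
def pvStepB (zeros : List Int) (doubledLen : Int) (material : Int) (best j : Int) : Int :=
  let left := if j > 0 then (PySem.List.pyGet? zeros (j - 1)).getD 0 else -1
  let right := if j + material < (zeros.length : Int) then (PySem.List.pyGet? zeros (j + material)).getD 0 else doubledLen
  max best (right - left - 1)

def findLargestIslandWithCircular_alt (islands : List Int) (material : Int) : Int :=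
  let n : Int := islands.length
  let doubled := islands ++ islands
  let zeros : List Int := ((PySem.List.enumerate doubled).filter (fun p => decide (p.2 = 0))).map (fun p => p.1)
  if (zeros.length : Int) ≤ material then min (doubled.length : Int) n
  else
    let best := (PySem.List.pyRange 0 ((zeros.length : Int) - material + 1) 1).foldl (pvStepB zeros (doubled.length : Int) material) 0
    min best n

-- ===== PRECONDITION & SPEC =====
-- Pre_ restricts to the natural domain material ≥ 0: for negative material A raises
-- IndexError on every nonempty input (the while loop runs left off the array), and on the
-- empty list A's returned 0 for a negative budget is a degenerate corner where B itself raises.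
def Pre_findLargestIslandWithCircular (islands : List Int) (material : Int) : Prop := 0 ≤ material
instance (islands : List Int) (material : Int) : Decidable (Pre_findLargestIslandWithCircular islands material) := by unfold Pre_findLargestIslandWithCircular; infer_instance
def pvWitness_findLargestIslandWithCircular : List Int × Int := ([1, 0, 2, 0, 1], 1)
def Spec_findLargestIslandWithCircular (islands : List Int) (material : Int) (out : Int) : Prop := out = findLargestIslandWithCircular_alt islands material
instance (islands : List Int) (material : Int) (out : Int) : Decidable (Spec_findLargestIslandWithCircular islands material out) := by unfold Spec_findLargestIslandWithCircular; infer_instance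

-- ===== CLAIM (what is proved, stated in full; the proofs are below) =====
def Claim_equal_findLargestIslandWithCircular : Prop := ∀ (islands : List Int) (material : Int), Dom_findLargestIslandWithCircular islands material → Pre_findLargestIslandWithCircular islands material → Spec_findLargestIslandWithCircular islands material (findLargestIslandWithCircular islands material)

-- ===== LEMMAS AND PROOFS =====

-- proof-side abstractions: zero positions, zero-count below k, leftmost admissible window
-- start, and closed forms of the two running maxima
def zIdx (d : List Int) : List Nat := (List.range d.length).filter (fun i => decide (d.getD i 1 = 0))
def zle (d : List Int) (k : Nat) : Nat := ((zIdx d).filter (fun z => decide (z < k))).length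
def minLeft (d : List Int) (M k : Nat) : Nat :=
  if zle d k ≤ M then 0 else (zIdx d).getD (zle d k - M - 1) 0 + 1
def aMax (d : List Int) (M : Nat) (cap : Int) : Nat → Int
  | 0 => 0
  | k+1 => max (aMax d M cap k) (min ((k+1 : Int) - (minLeft d M (k+1) : Int)) cap)
def gB (d : List Int) (M j : Nat) : Int :=
  (if j + M < (zIdx d).length then (((zIdx d).getD (j + M) 0 : Nat) : Int) else ((d.length : Nat) : Int))
  - (if 0 < j then (((zIdx d).getD (j - 1) 0 : Nat) : Int) else -1) - 1
def bMax (d : List Int) (M : Nat) : Nat → Int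
  | 0 => 0
  | j+1 => max (bMax d M j) (gB d M j)


theorem zIdx_pairwise (d : List Int) : (zIdx d).Pairwise (· < ·) :=
  (List.pairwise_lt_range).filter _

theorem zIdx_nodup (d : List Int) : (zIdx d).Nodup :=
  (zIdx_pairwise d).imp (fun h => Nat.ne_of_lt h)

theorem mem_zIdx (d : List Int) (k : Nat) : k ∈ zIdx d ↔ k < d.length ∧ d.getD k 1 = 0 := by
  simp [zIdx]

theorem zle_mono (d : List Int) {k k' : Nat} (h : k ≤ k') : zle d k ≤ zle d k' := by
  unfold zle
  rw [← List.countP_eq_length_filter, ← List.countP_eq_length_filter]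
  exact List.countP_mono_left (fun a _ ha => by simp_all; omega)

theorem zle_zero (d : List Int) : zle d 0 = 0 := by simp [zle]

theorem zle_le (d : List Int) (k : Nat) : zle d k ≤ (zIdx d).length :=
  List.length_filter_le _ _

theorem zle_length (d : List Int) : zle d d.length = (zIdx d).length := by
  unfold zle
  rw [List.filter_eq_self.mpr]
  intro a ha
  have := (mem_zIdx d a).mp ha
  simpa using this.1

theorem countLt_succ : ∀ (l : List Nat), l.Nodup → ∀ (k : Nat),
    (l.filter (fun z => decide (z < k+1))).length = (l.filter (fun z => decide (z < k))).length + (if k ∈ l then 1 else 0)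
  | [], _, k => by simp
  | a :: t, hl, k => by
    rw [List.nodup_cons] at hl
    have ht := countLt_succ t hl.2 k
    simp only [Nat.lt_succ_iff] at ht ⊢
    by_cases hak : a = k
    · subst hak
      simp [List.filter_cons, hl.1, ht]
    · have hale : a ≤ k ↔ a < k := by omega
      by_cases hkt : k ∈ t <;> by_cases halt : a < k <;>
        simp [List.filter_cons, hak, hkt, halt, ht, hale, List.mem_cons] <;> omega
termination_by l => l.length

theorem zle_succ (d : List Int) (k : Nat) :
    zle d (k+1) = zle d k + (if k < d.length ∧ d.getD k 1 = 0 then 1 else 0) := by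
  have h := countLt_succ (zIdx d) (zIdx_nodup d) k
  by_cases hk : k < d.length ∧ d.getD k 1 = 0
  · unfold zle; rw [h, if_pos ((mem_zIdx d k).mpr hk), if_pos hk]
  · unfold zle; rw [h, if_neg (fun hm => hk ((mem_zIdx d k).mp hm)), if_neg hk]

theorem filter_lt_getElem : ∀ (l : List Nat), l.Pairwise (· < ·) → ∀ (i : Nat) (h : i < l.length),
    l.filter (fun z => decide (z < l[i])) = l.take i := by
  intro l hl
  induction l with
  | nil => intro i h; simp at h
  | cons a t ih =>
    rcases hl with _ | ⟨ha, ht⟩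
    intro i h
    cases i with
    | zero =>
      simp only [List.getElem_cons_zero, List.take_zero]
      rw [List.filter_eq_nil_iff]
      intro x hx
      simp only [decide_eq_true_eq]
      rcases List.mem_cons.mp hx with rfl | hxt
      · omega
      · have := ha x hxt; omega
    | succ i =>
      simp only [List.getElem_cons_succ, List.take_succ_cons]
      rw [List.filter_cons_of_pos (by simp; exact ha _ (List.getElem_mem _))]
      exact congrArg _ (ih ht i (by simpa using h))

theorem zle_getElem (d : List Int) (i : Nat) (h : i < (zIdx d).length) :
    zle d ((zIdx d).getD i 0) = i := by
  unfold zle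
  rw [List.getD_eq_getElem _ _ h, filter_lt_getElem _ (zIdx_pairwise d) i h,
      List.length_take, Nat.min_eq_left (Nat.le_of_lt h)]

theorem getD_lt_length (d : List Int) (i : Nat) (h : i < (zIdx d).length) :
    (zIdx d).getD i 0 < d.length ∧ d.getD ((zIdx d).getD i 0) 1 = 0 := by
  rw [← mem_zIdx, List.getD_eq_getElem _ _ h]
  exact List.getElem_mem h

theorem le_getD_iff (d : List Int) (i k : Nat) (h : i < (zIdx d).length) :
    k ≤ (zIdx d).getD i 0 ↔ zle d k ≤ i := by
  constructor
  · intro hk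
    calc zle d k ≤ zle d ((zIdx d).getD i 0) := zle_mono d hk
    _ = i := zle_getElem d i h
  · intro hk
    by_contra hc
    push_neg at hc
    have h1 : zle d ((zIdx d).getD i 0 + 1) = i + 1 := by
      rw [zle_succ]
      rw [zle_getElem d i h, if_pos (getD_lt_length d i h)]
    have h2 : zle d ((zIdx d).getD i 0 + 1) ≤ zle d k := zle_mono d (by omega)
    omega

theorem zle_minLeft (d : List Int) (M k : Nat) (hk : k ≤ d.length) :
    zle d (minLeft d M k) = zle d k - M := by
  unfold minLeft
  split_ifs with h
  · rw [zle_zero]; omega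
  · have ht : zle d k - M - 1 < (zIdx d).length := by
      have := zle_le d k; omega
    rw [zle_succ]
    rw [zle_getElem d _ ht, if_pos (getD_lt_length d _ ht)]
    omega

theorem minLeft_le (d : List Int) (M k : Nat) (hk : k ≤ d.length) : minLeft d M k ≤ k := by
  unfold minLeft
  split_ifs with h
  · omega
  · have ht : zle d k - M - 1 < (zIdx d).length := by have := zle_le d k; omega
    have := (le_getD_iff d _ k ht).not
    simp only [not_le] at this
    have h2 := this.mpr (by omega)
    omega

theorem lt_minLeft (d : List Int) (M k l : Nat) (hk : k ≤ d.length) (h : l < minLeft d M k) :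
    M < zle d k - zle d l ∧ zle d l ≤ zle d k := by
  unfold minLeft at h
  split_ifs at h with hc
  · omega
  · have ht : zle d k - M - 1 < (zIdx d).length := by have := zle_le d k; omega
    have h1 : zle d l ≤ zle d k - M - 1 := (le_getD_iff d _ l ht).mp (by omega)
    have hm : minLeft d M k = (zIdx d).getD (zle d k - M - 1) 0 + 1 := by
      unfold minLeft; rw [if_neg hc]
    have hml := minLeft_le d M k hk
    constructor
    · omega
    · exact zle_mono d (by omega)

theorem minLeft_mono (d : List Int) (M k : Nat) (hk : k + 1 ≤ d.length) :
    minLeft d M k ≤ minLeft d M (k+1) := by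
  by_contra hc
  push_neg at hc
  have h1 := lt_minLeft d M k (minLeft d M (k+1)) (by omega) hc
  have h2 := zle_minLeft d M (k+1) hk
  have h3 : zle d k ≤ zle d (k+1) := zle_mono d (by omega)
  have h4 : zle d (minLeft d M (k+1)) ≤ zle d (k+1) :=
    zle_mono d (minLeft_le d M (k+1) hk)
  omega

theorem advance_spec (d : List Int) (M k : Nat) (hk : k ≤ d.length) :
    ∀ (fuel l : Nat), l ≤ minLeft d M k → minLeft d M k ≤ l + fuel →
    pvAdvance d (M : Int) fuel (l : Int) ((zle d k : Int) - (zle d l : Int)) =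
      ((minLeft d M k : Int), (zle d k : Int) - (zle d (minLeft d M k) : Int)) := by
  intro fuel
  induction fuel with
  | zero =>
    intro l h1 h2
    have : l = minLeft d M k := by omega
    subst this
    simp [pvAdvance]
  | succ fuel ih =>
    intro l h1 h2
    by_cases hl : l = minLeft d M k
    · subst hl
      have hle : zle d (minLeft d M k) = zle d k - M := zle_minLeft d M k hk
      have h4 : zle d (minLeft d M k) ≤ zle d k := zle_mono d (minLeft_le d M k hk)
      rw [pvAdvance, if_neg (by omega)]
    · have hlt : l < minLeft d M k := by omega
      have h3 := lt_minLeft d M k l hk hlt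
      have hllen : l < d.length := by have := minLeft_le d M k hk; omega
      rw [pvAdvance, if_pos (by omega)]
      have hget : (PySem.List.pyGet? d (l : Int)).getD 1 = d.getD l 1 := by
        rw [PySem.List.pyGet?_natCast, List.getElem?_eq_getElem hllen,
            List.getD_eq_getElem d 1 hllen]
        rfl
      have hsucc := zle_succ d l
      have hmono : zle d l ≤ zle d (l+1) := zle_mono d (by omega)
      have step : (if (PySem.List.pyGet? d (l : Int)).getD 1 = 0
          then (zle d k : Int) - (zle d l : Int) - 1 else (zle d k : Int) - (zle d l : Int))
          = (zle d k : Int) - (zle d (l+1) : Int) := by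
        rw [hget]
        split_ifs with hz
        · rw [hsucc, if_pos ⟨hllen, hz⟩]; push_cast; ring
        · rw [hsucc, if_neg (by tauto)]; push_cast; ring
      simp only []
      rw [step]
      have := ih (l+1) (by omega) (by omega)
      rw [← this]
      norm_num

theorem minLeft_zero (d : List Int) (M : Nat) : minLeft d M 0 = 0 := by
  unfold minLeft
  rw [zle_zero, if_pos (Nat.zero_le M)]

theorem foldA_spec (d : List Int) (M : Nat) :
    ∀ (k : Nat), k ≤ d.length →
    (PySem.List.pyRange 0 (k : Int) 1).foldl (pvStepA d (M : Int)) (0, 0, 0) =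
      (aMax d M (PySem.Int.floordiv (d.length : Int) 2) k,
       (minLeft d M k : Int), (zle d k : Int) - (zle d (minLeft d M k) : Int)) := by
  intro k
  induction k with
  | zero =>
    intro _
    rw [PySem.List.pyRange_one_eq_nil (by omega)]
    simp [aMax, minLeft_zero, zle_zero]
  | succ k ih =>
    intro hk
    have hcast : ((k+1 : Nat) : Int) = (k : Int) + 1 := by push_cast; ring
    rw [hcast, PySem.List.pyRange_one_succ_right (by positivity), List.foldl_append,
        ih (by omega)]
    show pvStepA d (M : Int) _ (k : Int) = _
    unfold pvStepA
    have hklen : k < d.length := by omega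
    have hget : (PySem.List.pyGet? d (k : Int)).getD 1 = d.getD k 1 := by
      rw [PySem.List.pyGet?_natCast, List.getElem?_eq_getElem hklen,
          List.getD_eq_getElem d 1 hklen]
      rfl
    have hcnt : (if (PySem.List.pyGet? d (k : Int)).getD 1 = 0
        then ((zle d k : Int) - (zle d (minLeft d M k) : Int)) + 1
        else (zle d k : Int) - (zle d (minLeft d M k) : Int))
        = (zle d (k+1) : Int) - (zle d (minLeft d M k) : Int) := by
      rw [hget]
      have hsucc := zle_succ d k
      split_ifs with hz
      · rw [hsucc, if_pos ⟨hklen, hz⟩]; push_cast; ring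
      · rw [hsucc, if_neg (by tauto)]; push_cast; ring
    simp only []
    rw [hcnt]
    have hadv := advance_spec d M (k+1) (by omega) (d.length + 1) (minLeft d M k)
      (minLeft_mono d M k hk)
      (by have := minLeft_le d M (k+1) hk; omega)
    rw [hadv]
    have hterm : (k : Int) - (minLeft d M (k+1) : Int) + 1
        = ((k+1 : Nat) : Int) - (minLeft d M (k+1) : Int) := by push_cast; ring
    simp only [aMax]
    push_cast
    ring_nf

theorem portA_eq (islands : List Int) (M : Nat) :
    findLargestIslandWithCircular islands (M : Int) =
      aMax (islands ++ islands) M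
        (PySem.Int.floordiv (((islands ++ islands).length : Nat) : Int) 2)
        (islands ++ islands).length := by
  show ((PySem.List.pyRange 0 (((islands ++ islands).length : Nat) : Int) 1).foldl
      (pvStepA (islands ++ islands) ((M : Nat) : Int)) (0, 0, 0)).1 = _
  rw [foldA_spec (islands ++ islands) M (islands ++ islands).length (le_refl _)]

theorem zerosB_eq (d : List Int) :
    ((PySem.List.enumerate d).filter (fun p => decide (p.2 = 0))).map (fun p => p.1)
      = (zIdx d).map (fun i => ((i : Nat) : Int)) := by
  rw [PySem.List.enumerate_eq_map_pyRange d 1]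
  have hlen : PySem.List.len d = ((d.length : Nat) : Int) := by
    simp [PySem.List.len]
  rw [hlen, PySem.List.pyRange_zero_nat, List.map_map, List.filter_map, List.map_map]
  unfold zIdx
  have hp : ((fun p : Int × Int => decide (p.2 = 0)) ∘ (fun j => (j, PySem.List.pyGetD d j 1)) ∘ fun k : Nat => (k : Int)) = (fun i => decide (d.getD i 1 = 0)) := by
    funext k
    simp [PySem.List.pyGetD_natCast]
  have hf : ((fun p : Int × Int => p.1) ∘ (fun j => (j, PySem.List.pyGetD d j 1)) ∘ fun k : Nat => (k : Int)) = (fun i : Nat => (i : Int)) := by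
    funext k
    rfl
  rw [hp, hf]

theorem foldB_spec (d : List Int) (M : Nat) (hLM : M < (zIdx d).length) :
    ∀ (J : Nat), J ≤ (zIdx d).length - M + 1 →
    (PySem.List.pyRange 0 (J : Int) 1).foldl
      (pvStepB ((zIdx d).map (fun i => ((i : Nat) : Int))) (((d.length : Nat) : Int)) ((M : Nat) : Int)) 0
      = bMax d M J := by
  intro J
  induction J with
  | zero =>
    intro _
    rw [PySem.List.pyRange_one_eq_nil (by omega)]
    rfl
  | succ J ih =>
    intro hJ
    have hcast : ((J+1 : Nat) : Int) = (J : Int) + 1 := by push_cast; ring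
    rw [hcast, PySem.List.pyRange_one_succ_right (by positivity), List.foldl_append,
        ih (by omega)]
    show pvStepB _ _ _ (bMax d M J) (J : Int) = bMax d M (J+1)
    unfold pvStepB
    have hmaplen : (((zIdx d).map (fun i => ((i : Nat) : Int))).length : Int) = ((zIdx d).length : Int) := by
      rw [List.length_map]
    have hJle : J ≤ (zIdx d).length - M := by omega
    have hleft : (if (J : Int) > 0 then (PySem.List.pyGet? ((zIdx d).map (fun i => ((i : Nat) : Int))) ((J : Int) - 1)).getD 0 else -1)
        = (if 0 < J then (((zIdx d).getD (J - 1) 0 : Nat) : Int) else -1) := by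
      by_cases hJ0 : 0 < J
      · rw [if_pos (by exact_mod_cast hJ0), if_pos hJ0]
        have hc2 : (J : Int) - 1 = ((J - 1 : Nat) : Int) := by
          have : 1 ≤ J := hJ0; push_cast [this]; ring
        rw [hc2, PySem.List.pyGet?_natCast]
        have hidx : J - 1 < (zIdx d).length := by omega
        rw [List.getElem?_map, List.getElem?_eq_getElem hidx]
        rw [List.getD_eq_getElem _ _ hidx]
        rfl
      · rw [if_neg (by exact_mod_cast hJ0), if_neg hJ0]
    have hright : (if (J : Int) + ((M : Nat) : Int) < (((zIdx d).map (fun i => ((i : Nat) : Int))).length : Int) then (PySem.List.pyGet? ((zIdx d).map (fun i => ((i : Nat) : Int))) ((J : Int) + ((M : Nat) : Int))).getD 0 else ((d.length : Nat) : Int))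
        = (if J + M < (zIdx d).length then (((zIdx d).getD (J + M) 0 : Nat) : Int) else ((d.length : Nat) : Int)) := by
      rw [hmaplen]
      by_cases hjm : J + M < (zIdx d).length
      · rw [if_pos (by exact_mod_cast hjm), if_pos hjm]
        have hc3 : (J : Int) + ((M : Nat) : Int) = ((J + M : Nat) : Int) := by push_cast; ring
        rw [hc3, PySem.List.pyGet?_natCast, List.getElem?_map, List.getElem?_eq_getElem hjm]
        rw [List.getD_eq_getElem _ _ hjm]
        rfl
      · rw [if_neg (by exact_mod_cast hjm), if_neg hjm]
    simp only []
    rw [hleft, hright]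
    rfl

-- ===== simple fold-max facts =====
theorem aMax_nonneg (d : List Int) (M : Nat) (cap : Int) (K : Nat) : 0 ≤ aMax d M cap K := by
  induction K with
  | zero => simp [aMax]
  | succ K ih => simp only [aMax]; omega

theorem bMax_nonneg (d : List Int) (M : Nat) (J : Nat) : 0 ≤ bMax d M J := by
  induction J with
  | zero => simp [bMax]
  | succ J ih => simp only [bMax]; omega

theorem aMax_le (d : List Int) (M : Nat) (cap : Int) (K : Nat) (c : Int) (hc : 0 ≤ c)
    (h : ∀ k, 1 ≤ k → k ≤ K → min ((k : Int) - (minLeft d M k : Int)) cap ≤ c) :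
    aMax d M cap K ≤ c := by
  induction K with
  | zero => simpa [aMax] using hc
  | succ K ih =>
    have h1 := h (K+1) (by omega) (by omega)
    have h2 := ih (fun k a b => h k a (by omega))
    simp only [aMax]; omega

theorem le_aMax (d : List Int) (M : Nat) (cap : Int) (K k : Nat) (h1 : 1 ≤ k) (h2 : k ≤ K) :
    min ((k : Int) - (minLeft d M k : Int)) cap ≤ aMax d M cap K := by
  induction K with
  | zero => omega
  | succ K ih =>
    by_cases hk : k = K + 1
    · subst hk; simp only [aMax]; omega
    · have := ih (by omega); simp only [aMax]; omega

theorem gB_le_bMax (d : List Int) (M : Nat) (J j : Nat) (h : j < J) : gB d M j ≤ bMax d M J := by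
  induction J with
  | zero => omega
  | succ J ih =>
    by_cases hj : j = J
    · subst hj; simp only [bMax]; omega
    · have := ih (by omega); simp only [bMax]; omega

theorem min_bMax_le (d : List Int) (M : Nat) (cap : Int) (J : Nat) (c : Int) (hc : 0 ≤ c)
    (h : ∀ j, j < J → min (gB d M j) cap ≤ c) : min (bMax d M J) cap ≤ c := by
  induction J with
  | zero => simp only [bMax]; omega
  | succ J ih =>
    have h1 := h J (by omega)
    have h2 := ih (fun j hj => h j (by omega))
    simp only [bMax]; omega

-- ===== per-index comparisons =====
theorem f_le_g (d : List Int) (M k : Nat) (hM : M < (zIdx d).length)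
    (h1 : 1 ≤ k) (h2 : k ≤ d.length) :
    ∃ j, j ≤ (zIdx d).length - M ∧ (k : Int) - (minLeft d M k : Int) ≤ gB d M j := by
  by_cases hz : zle d k ≤ M
  · refine ⟨0, by omega, ?_⟩
    have hk : k ≤ (zIdx d).getD M 0 := (le_getD_iff d M k hM).mpr hz
    unfold minLeft gB
    rw [if_pos hz, if_pos (by omega : 0 + M < (zIdx d).length), if_neg (by omega)]
    simp only [Nat.zero_add]
    push_cast
    omega
  · push_neg at hz
    have hzle := zle_le d k
    refine ⟨zle d k - M, by omega, ?_⟩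
    have hj1 : 0 < zle d k - M := by omega
    unfold minLeft gB
    rw [if_neg (show ¬ zle d k ≤ M by omega), if_pos hj1]
    have hidx : zle d k - M - 1 < (zIdx d).length := by omega
    by_cases hzL : zle d k < (zIdx d).length
    · rw [if_pos (by omega : zle d k - M + M < (zIdx d).length)]
      have heq : zle d k - M + M = zle d k := by omega
      rw [heq]
      have hk2 : k ≤ (zIdx d).getD (zle d k) 0 := (le_getD_iff d (zle d k) k hzL).mpr (le_refl _)
      have : zle d k - M - 1 = zle d k - M - 1 := rfl
      push_cast
      omega
    · rw [if_neg (show ¬ (zle d k - M + M < (zIdx d).length) by omega)]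
      push_cast
      omega

theorem g_le_f (d : List Int) (M j : Nat) (hM : M < (zIdx d).length)
    (hj : j ≤ (zIdx d).length - M) :
    gB d M j ≤ 0 ∨ ∃ k, 1 ≤ k ∧ k ≤ d.length ∧ gB d M j ≤ (k : Int) - (minLeft d M k : Int) := by
  by_cases hj0 : 0 < j
  · right
    by_cases hjm : j + M < (zIdx d).length
    · refine ⟨(zIdx d).getD (j + M) 0, ?_, ?_, ?_⟩
      · have hzk := zle_getElem d (j + M) hjm
        by_contra hc
        push_neg at hc
        have : (zIdx d).getD (j + M) 0 = 0 := by omega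
        rw [this, zle_zero] at hzk
        omega
      · exact le_of_lt (getD_lt_length d (j+M) hjm).1
      · have hzk := zle_getElem d (j + M) hjm
        unfold minLeft gB
        rw [hzk, if_neg (show ¬ (j + M ≤ M) by omega), if_pos hjm, if_pos hj0]
        have : j + M - M - 1 = j - 1 := by omega
        rw [this]
        push_cast
        omega
    · have hjeq : j = (zIdx d).length - M := by omega
      have hN : 0 < d.length := by
        by_contra hc
        push_neg at hc
        have hd0 : d.length = 0 := by omega
        have : (zIdx d).length = 0 := by unfold zIdx; rw [hd0]; simp
        omega
      refine ⟨d.length, by omega, le_refl _, ?_⟩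
      have hzN : zle d d.length = (zIdx d).length := zle_length d
      unfold minLeft gB
      rw [hzN, if_neg (show ¬ ((zIdx d).length ≤ M) by omega), if_neg hjm, if_pos hj0]
      have heq2 : (zIdx d).length - M - 1 = j - 1 := by omega
      rw [heq2]
      push_cast
      omega
  · have hj0' : j = 0 := by omega
    subst hj0'
    by_cases hg0 : (zIdx d).getD M 0 = 0
    · left
      unfold gB
      rw [if_pos (by omega : 0 + M < (zIdx d).length), if_neg (by omega)]
      simp only [Nat.zero_add]
      rw [hg0]
      norm_num
    · right
      refine ⟨(zIdx d).getD M 0, by omega, le_of_lt (getD_lt_length d M hM).1, ?_⟩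
      have hzk := zle_getElem d M hM
      unfold minLeft gB
      rw [hzk, if_pos (le_refl M), if_pos (by omega : 0 + M < (zIdx d).length), if_neg (by omega)]
      simp only [Nat.zero_add]
      push_cast
      omega

theorem aMax_eq_min_bMax (d : List Int) (M : Nat) (cap : Int) (hcap : 0 ≤ cap)
    (hM : M < (zIdx d).length) :
    aMax d M cap d.length = min (bMax d M ((zIdx d).length - M + 1)) cap := by
  apply le_antisymm
  · apply aMax_le _ _ _ _ _ (by have := bMax_nonneg d M ((zIdx d).length - M + 1); omega)
    intro k h1 h2
    obtain ⟨j, hj, hfg⟩ := f_le_g d M k hM h1 h2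
    have := gB_le_bMax d M ((zIdx d).length - M + 1) j (by omega)
    omega
  · apply min_bMax_le _ _ _ _ _ (aMax_nonneg d M cap d.length)
    intro j hj
    rcases g_le_f d M j hM (by omega) with hle | ⟨k, hk1, hk2, hgf⟩
    · have := aMax_nonneg d M cap d.length; omega
    · have := le_aMax d M cap d.length k hk1 hk2; omega

theorem aMax_all (d : List Int) (M : Nat) (cap : Int) (hcap : 0 ≤ cap)
    (hLM : (zIdx d).length ≤ M) :
    ∀ k, k ≤ d.length → aMax d M cap k = min (k : Int) cap := by
  intro k
  induction k with
  | zero =>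
    intro _
    simp only [aMax, Nat.cast_zero]
    omega
  | succ k ih =>
    intro hk
    have hml : minLeft d M (k+1) = 0 := by
      unfold minLeft
      rw [if_pos (by have h1 := zle_le d (k+1); omega)]
    simp only [aMax, hml]
    rw [ih (by omega)]
    push_cast
    omega

theorem cap_eq (islands : List Int) :
    PySem.Int.floordiv ((((islands ++ islands).length : Nat)) : Int) 2 = ((islands.length : Nat) : Int) := by
  rw [List.length_append, PySem.Int.floordiv_eq_ediv_of_pos (by omega)]
  have h2 : (((islands.length + islands.length : Nat)) : Int) = 2 * ((islands.length : Nat) : Int) := by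
    push_cast; ring
  rw [h2, Int.mul_ediv_cancel_left _ (by norm_num)]

theorem portB_eq (islands : List Int) (M : Nat) :
    findLargestIslandWithCircular_alt islands ((M : Nat) : Int) =
      if ((zIdx (islands ++ islands)).length : Int) ≤ ((M : Nat) : Int)
      then min ((((islands ++ islands).length : Nat)) : Int) ((islands.length : Nat) : Int)
      else min (bMax (islands ++ islands) M ((zIdx (islands ++ islands)).length - M + 1)) ((islands.length : Nat) : Int) := by
  simp only [findLargestIslandWithCircular_alt]
  rw [zerosB_eq (islands ++ islands), List.length_map]
  by_cases hLM : (zIdx (islands ++ islands)).length ≤ M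
  · rw [if_pos (by exact_mod_cast hLM), if_pos (by exact_mod_cast hLM)]
  · rw [if_neg (by exact_mod_cast hLM), if_neg (by exact_mod_cast hLM)]
    have hML : M < (zIdx (islands ++ islands)).length := by omega
    have hc : ((zIdx (islands ++ islands)).length : Int) - ((M : Nat) : Int) + 1
        = (((zIdx (islands ++ islands)).length - M + 1 : Nat) : Int) := by
      push_cast [Nat.le_of_lt hML]; ring
    rw [hc, foldB_spec (islands ++ islands) M hML ((zIdx (islands ++ islands)).length - M + 1) (le_refl _)]

-- ===== VERDICT (by name: the statement is the Claim_ definition above) =====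
theorem findLargestIslandWithCircular_spec : Claim_equal_findLargestIslandWithCircular := by
  unfold Claim_equal_findLargestIslandWithCircular
  intro islands material _hdom hpre
  unfold Spec_findLargestIslandWithCircular
  unfold Pre_findLargestIslandWithCircular at hpre
  obtain ⟨M, rfl⟩ : ∃ M : Nat, material = ((M : Nat) : Int) :=
    ⟨material.toNat, (Int.toNat_of_nonneg hpre).symm⟩
  rw [portA_eq islands M, cap_eq islands, portB_eq islands M]
  by_cases hLM : (zIdx (islands ++ islands)).length ≤ M
  · rw [if_pos (by exact_mod_cast hLM)]
    rw [aMax_all (islands ++ islands) M ((islands.length : Nat) : Int) (by positivity) hLM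
        (islands ++ islands).length (le_refl _)]
  · rw [if_neg (by exact_mod_cast hLM)]
    exact aMax_eq_min_bMax (islands ++ islands) M ((islands.length : Nat) : Int)
      (by positivity) (by omega)
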